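-- pv_equiv track=rewrite | github.com/VikaAstafyeva/PythonClasses | Lab8.py | dy
-- ===== SOURCE A (Python) =====
-- def dy(y,j):
--     mas1=[]
--     for i in range(len(y)):
--         mas1.append(y[i]-y[i-1])
--     mas1.pop(0)
--     if j ==1:
--         return mas1
--     else:
--         j-=1
--         return dy(mas1,j)
-- ===== SOURCE B (Python) =====
-- def dy(y, j):
--     while True:
--         prev = y[0]
--         out = []
--         for v in y[1:]:
--             out.append(v - prev)
--             prev = v
--         if j == 1:
--             return out
--         j -= 1
--         y = out
-- ===== Notes on version B (the rewrite author's own statement) =====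
-- stated objective: alternative
-- what changed: Replaces the recursion whose level pass indexes y[i]-y[i-1] over range(len(y)) (creating a wraparound first element that is immediately removed by an O(n) pop(0)) by an iterative while-loop whose level pass is a single running-previous accumulator over the elements, with no index arithmetic, no wraparound element and no pop.
import Mathlib
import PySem

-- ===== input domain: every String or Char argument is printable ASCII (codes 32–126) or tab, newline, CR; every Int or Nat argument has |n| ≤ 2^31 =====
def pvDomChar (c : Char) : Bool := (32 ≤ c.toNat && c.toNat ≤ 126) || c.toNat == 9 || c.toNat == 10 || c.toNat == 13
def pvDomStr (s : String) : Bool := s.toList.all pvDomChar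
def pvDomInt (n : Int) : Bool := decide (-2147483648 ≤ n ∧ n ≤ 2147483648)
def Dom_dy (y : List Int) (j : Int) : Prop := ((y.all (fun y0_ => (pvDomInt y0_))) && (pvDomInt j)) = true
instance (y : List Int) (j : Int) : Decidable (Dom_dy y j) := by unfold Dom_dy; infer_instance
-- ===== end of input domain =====

-- B replaces A's recursion over index-built difference levels (wraparound element then pop(0))
-- by an iterative while-loop whose level pass is a running-previous accumulator: alternative.

-- ===== PORT A =====
-- A-side helper: the 'for i in range(len(y)): mas1.append(y[i]-y[i-1])' loop.
-- On every i this loop reaches, pyGet? is some (i and i-1 are in Python range for nonempty y,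
-- and for empty y the loop body never runs), so '.getD 0' is never the value used.
def pvMas1 (y : List Int) : List Int :=
  (PySem.List.pyRange 0 (y.length : Int) 1).foldl
    (fun acc i => acc ++ [(PySem.List.pyGet? y i).getD 0 - (PySem.List.pyGet? y (i - 1)).getD 0]) []

-- needed by dy's termination proof (cited in decreasing_by)
theorem pvFoldlAppendSingleton {α β : Type} (l : List α) (g : α → β) :
    ∀ (init : List β), (l.foldl (fun acc i => acc ++ [g i]) init) = init ++ l.map g := by
  induction l with
  | nil => intro init; simp
  | cons a t ih => intro init; simp [List.foldl_cons, ih]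

theorem pvMas1_length (y : List Int) : (pvMas1 y).length = y.length := by
  rw [pvMas1, pvFoldlAppendSingleton]
  simp [PySem.List.length_pyRange_one]

def dy (y : List Int) (j : Int) : List Int :=
  match h : PySem.List.pop? (pvMas1 y) 0 with
  | none => []   -- IndexError in Python (outside Pre_dy)
  | some (_, rest) => if j == 1 then rest else dy rest (j - 1)
termination_by y.length
decreasing_by
  have h1 : rest.length + 1 = (pvMas1 y).length := PySem.List.length_of_pop?_eq_some _ h
  have h2 := pvMas1_length y
  omega

-- ===== PORT B =====
-- needed by dy_alt's termination proof (cited in decreasing_by)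
theorem pvFoldDiffLen (l : List Int) :
    ∀ (acc : List Int) (prev : Int),
      ((l.foldl (fun (st : List Int × Int) v => (st.1 ++ [v - st.2], v)) (acc, prev)).1).length
        = acc.length + l.length := by
  induction l with
  | nil => intro acc prev; simp
  | cons v t ih => intro acc prev; simp [List.foldl_cons, ih]; omega

def dy_alt (y : List Int) (j : Int) : List Int :=
  match hp : PySem.List.pyGet? y 0 with
  | none => []   -- IndexError from y[0] in Python (outside Pre_dy)
  | some prev =>
    let st := (PySem.List.slice y (some 1) none).foldl
      (fun (st : List Int × Int) v => (st.1 ++ [v - st.2], v)) ([], prev)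
    if j == 1 then st.1 else dy_alt st.1 (j - 1)
termination_by y.length
decreasing_by
  have hne : y ≠ [] := by
    intro h
    rw [h] at hp
    simp [PySem.List.pyGet?] at hp
  have h1 := pvFoldDiffLen (PySem.List.slice y (some 1) none) [] prev
  rw [PySem.List.slice_from_one] at h1
  simp only [List.length_nil, List.length_tail] at h1
  have h2 : 0 < y.length := List.length_pos_iff.mpr hne
  rw [PySem.List.slice_from_one, h1]
  omega

-- ===== PRECONDITION & SPEC =====
-- Pre_dy: exactly the inputs on which A returns; outside it (j < 1 or j > len(y)) A raises
-- IndexError (pop(0) on an empty difference level).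
def Pre_dy (y : List Int) (j : Int) : Prop := 1 ≤ j ∧ j ≤ (y.length : Int)
instance (y : List Int) (j : Int) : Decidable (Pre_dy y j) := by unfold Pre_dy; infer_instance
def pvWitness_dy : List Int × Int := ([1, 4, 9, 16], 2)

def Spec_dy (y : List Int) (j : Int) (out : List Int) : Prop := out = dy_alt y j
instance (y : List Int) (j : Int) (out : List Int) : Decidable (Spec_dy y j out) := by unfold Spec_dy; infer_instance

-- ===== CLAIM (what is proved, stated in full; the proofs are below) =====
def Claim_equal_dy : Prop := ∀ (y : List Int) (j : Int), Dom_dy y j → Pre_dy y j → Spec_dy y j (dy y j)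

-- ===== LEMMAS AND PROOFS =====

-- the one-level difference pass (the body of B's loop)
def pvStep (y : List Int) : List Int := (y.zip (y.drop 1)).map (fun p => p.2 - p.1)

theorem pvStep_length (y : List Int) : (pvStep y).length = y.length - 1 := by
  simp [pvStep]

theorem pvMas1_cons (y : List Int) (hy : y ≠ []) :
    ∃ a, pvMas1 y = a :: pvStep y := by
  have hn : 0 < y.length := List.length_pos_iff.mpr hy
  have hcons : PySem.List.pyRange 0 (y.length : Int) 1 =
      0 :: PySem.List.pyRange 1 (y.length : Int) 1 :=
    PySem.List.pyRange_one_cons (by exact_mod_cast hn)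
  refine ⟨(PySem.List.pyGet? y 0).getD 0 - (PySem.List.pyGet? y (0 - 1)).getD 0, ?_⟩
  rw [pvMas1, pvFoldlAppendSingleton, hcons]
  simp only [List.map_cons, List.nil_append]
  congr 1
  apply List.ext_getElem
  · simp [PySem.List.length_pyRange_one, pvStep_length]
  · intro i hi1 hi2
    have hi : i < y.length - 1 := by
      simpa [PySem.List.length_pyRange_one] using hi1
    have hlen : i < (PySem.List.pyRange 1 (y.length : Int) 1).length := by
      simp [PySem.List.length_pyRange_one]; omega
    simp only [List.getElem_map]
    rw [PySem.List.getElem_pyRange_one 1 (y.length : Int) i hlen]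
    have e1 : (1 : Int) + (i : Int) = ((i + 1 : Nat) : Int) := by push_cast; ring
    rw [e1]
    have g1 : PySem.List.pyGet? y ((i + 1 : Nat) : Int) = y[(i+1)]? := PySem.List.pyGet?_natCast ..
    have g2 : PySem.List.pyGet? y (((i + 1 : Nat) : Int) - 1) = y[i]? := by
      rw [show ((i + 1 : Nat) : Int) - 1 = ((i : Nat) : Int) by push_cast; ring]
      exact PySem.List.pyGet?_natCast ..
    rw [g1, g2]
    have h1 : i + 1 < y.length := by omega
    have h2 : i < y.length := by omega
    simp [pvStep, h1, h2, List.getElem_zip]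

theorem dy_cons (y : List Int) (a : Int) (t : List Int) (ha : pvMas1 y = a :: t) (j : Int) :
    dy y j = if j == 1 then t else dy t (j - 1) := by
  rw [dy.eq_def, ha]
  split
  · next heq => rw [PySem.List.pop?_zero_cons] at heq; exact absurd heq (by simp)
  · next fst rest heq =>
    rw [PySem.List.pop?_zero_cons] at heq
    simp only [Option.some.injEq, Prod.mk.injEq] at heq
    rw [heq.2]

theorem dy_eq_iterate : ∀ (k : Nat) (y : List Int), k < y.length →
    dy y ((k : Int) + 1) = pvStep^[k + 1] y := by
  intro k
  induction k with
  | zero =>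
    intro y hk
    obtain ⟨a, ha⟩ := pvMas1_cons y (by intro h; simp [h] at hk)
    rw [dy_cons y a _ ha]
    simp
  | succ k ih =>
    intro y hk
    obtain ⟨a, ha⟩ := pvMas1_cons y (by intro h; simp [h] at hk)
    rw [dy_cons y a _ ha]
    have hne : ((k + 1 : Nat) : Int) + 1 ≠ 1 := by push_cast; omega
    rw [if_neg (by simpa using hne)]
    have harg : ((k + 1 : Nat) : Int) + 1 - 1 = (k : Int) + 1 := by push_cast; ring
    rw [harg]
    have hlen : k < (pvStep y).length := by rw [pvStep_length]; omega
    rw [ih (pvStep y) hlen]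
    rw [← Function.iterate_succ_apply]

theorem pvFoldDiff (l : List Int) :
    ∀ (acc : List Int) (prev : Int),
      (l.foldl (fun (st : List Int × Int) v => (st.1 ++ [v - st.2], v)) (acc, prev)).1
        = acc ++ pvStep (prev :: l) := by
  induction l with
  | nil => intro acc prev; simp [pvStep]
  | cons v t ih =>
    intro acc prev
    simp only [List.foldl_cons, ih]
    simp [pvStep]

theorem dy_alt_cons (y : List Int) (hy : y ≠ []) (j : Int) :
    dy_alt y j = if j == 1 then pvStep y else dy_alt (pvStep y) (j - 1) := by
  obtain ⟨a, t, rfl⟩ : ∃ a t, y = a :: t := by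
    cases y with
    | nil => exact absurd rfl hy
    | cons a t => exact ⟨a, t, rfl⟩
  rw [dy_alt.eq_def]
  split
  · next heq => simp at heq
  · next prev heq =>
    rw [PySem.List.pyGet?_zero] at heq
    simp only [List.getElem?_cons_zero, Option.some.injEq] at heq
    subst heq
    simp only [PySem.List.slice_from_one, List.tail_cons, pvFoldDiff, List.nil_append]

theorem dy_alt_eq_iterate : ∀ (k : Nat) (y : List Int), k < y.length →
    dy_alt y ((k : Int) + 1) = pvStep^[k + 1] y := by
  intro k
  induction k with
  | zero =>
    intro y hk
    rw [dy_alt_cons y (by intro h; simp [h] at hk)]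
    simp
  | succ k ih =>
    intro y hk
    rw [dy_alt_cons y (by intro h; simp [h] at hk)]
    have hne : ((k + 1 : Nat) : Int) + 1 ≠ 1 := by push_cast; omega
    rw [if_neg (by simpa using hne)]
    have harg : ((k + 1 : Nat) : Int) + 1 - 1 = (k : Int) + 1 := by push_cast; ring
    rw [harg]
    have hlen : k < (pvStep y).length := by rw [pvStep_length]; omega
    rw [ih (pvStep y) hlen]
    rw [← Function.iterate_succ_apply]

-- ===== VERDICT (by name: the statement is the Claim_ definition above) =====
theorem dy_spec : Claim_equal_dy := by
  intro y j _ hpre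
  obtain ⟨h1, h2⟩ := hpre
  unfold Spec_dy
  have hk : j = ((j - 1).toNat : Int) + 1 := by omega
  have hlen : (j - 1).toNat < y.length := by omega
  rw [hk, dy_eq_iterate _ y hlen, dy_alt_eq_iterate _ y hlen]
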